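-- pv_equiv track=rewrite | github.com/terrapower/armi | armi/utils/asciimaps.py | _removeTrailingPlaceholders
-- ===== SOURCE A (Python) =====
-- PLACEHOLDER = "-"
--
-- def _removeTrailingPlaceholders(line):
--     newLine = []
--     noDataYet = True
--     for col in reversed(line):
--         if col == PLACEHOLDER and noDataYet:
--             continue
--         noDataYet = False
--         newLine.append(col)
--     newLine.reverse()
--     return newLine
-- ===== SOURCE B (Python) =====
-- PLACEHOLDER = "-"
--
-- def _removeTrailingPlaceholders(line):
--     n = len(line)
--     while n > 0 and line[n - 1] == PLACEHOLDER:
--         n -= 1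
--     return list(line[:n])
-- ===== Notes on version B (the rewrite author's own statement) =====
-- stated objective: simpler
-- what changed: Replaces A's reverse-iterate/flag/append/reverse machinery with a backward scan for the trim boundary followed by a single slice.
import Mathlib
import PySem

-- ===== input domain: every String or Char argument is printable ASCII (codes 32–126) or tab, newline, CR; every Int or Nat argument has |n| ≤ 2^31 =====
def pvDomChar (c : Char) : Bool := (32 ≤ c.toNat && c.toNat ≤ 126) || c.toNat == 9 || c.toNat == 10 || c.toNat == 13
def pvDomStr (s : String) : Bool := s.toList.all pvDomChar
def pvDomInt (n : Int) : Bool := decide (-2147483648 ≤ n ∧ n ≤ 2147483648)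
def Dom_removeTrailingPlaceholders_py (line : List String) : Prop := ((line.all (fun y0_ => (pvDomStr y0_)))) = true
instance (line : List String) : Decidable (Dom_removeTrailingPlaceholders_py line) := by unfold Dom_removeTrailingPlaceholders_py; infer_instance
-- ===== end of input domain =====

-- B computes the trim boundary by a backward scan and returns one slice, replacing A's
-- reverse-iterate/flag/append/reverse construction (objective: simpler decomposition).

-- ===== PORT A =====
-- for col in reversed(line): if col == "-" and noDataYet: continue; noDataYet=False; newLine.append(col)
def pvStepA (acc : List String × Bool) (col : String) : List String × Bool :=
  if col == "-" && acc.2 then acc else (acc.1 ++ [col], false)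

def removeTrailingPlaceholders_py (line : List String) : List String :=
  (line.reverse.foldl pvStepA ([], true)).1.reverse

-- ===== PORT B =====
-- while n > 0 and line[n-1] == "-": n -= 1   (the index n-1 is always in range here)
def pvTrimLen (line : List String) : Nat → Nat
  | 0 => 0
  | n + 1 => if getElem? line n == some "-" then pvTrimLen line n else n + 1

-- return list(line[:n])
def removeTrailingPlaceholders_py_alt (line : List String) : List String :=
  line.take (pvTrimLen line line.length)

-- ===== PRECONDITION & SPEC =====
def Spec_removeTrailingPlaceholders_py (line : List String) (out : List String) : Prop := out = removeTrailingPlaceholders_py_alt line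
instance (line : List String) (out : List String) : Decidable (Spec_removeTrailingPlaceholders_py line out) := by unfold Spec_removeTrailingPlaceholders_py; infer_instance

-- ===== CLAIM (what is proved, stated in full; the proofs are below) =====
def Claim_equal_removeTrailingPlaceholders_py : Prop := ∀ (line : List String), Dom_removeTrailingPlaceholders_py line → Spec_removeTrailingPlaceholders_py line (removeTrailingPlaceholders_py line)

-- ===== LEMMAS AND PROOFS =====

-- A's loop once the flag is false just appends everything.
theorem pvFoldFlagFalse (r : List String) (acc : List String) :
    r.foldl pvStepA (acc, false) = (acc ++ r, false) := by
  induction r generalizing acc with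
  | nil => simp
  | cons c cs ih =>
    have h1 : pvStepA (acc, false) c = (acc ++ [c], false) := by simp [pvStepA]
    rw [List.foldl_cons, h1, ih]
    simp

-- A's loop result on the reversed list is dropWhile (== "-").
theorem pvFoldEqDropWhile (r : List String) :
    (r.foldl pvStepA ([], true)).1 = r.dropWhile (fun c => c == "-") := by
  induction r with
  | nil => rfl
  | cons c cs ih =>
    by_cases h : c = "-"
    · have h1 : pvStepA ([], true) c = ([], true) := by simp [pvStepA, h]
      rw [List.foldl_cons, h1, ih, List.dropWhile_cons]
      simp [h]
    · have hb : (c == "-") = false := by simp [h]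
      have h1 : pvStepA ([], true) c = ([c], false) := by simp [pvStepA, hb]
      rw [List.foldl_cons, h1, pvFoldFlagFalse, List.dropWhile_cons]
      simp [hb]

theorem pvA_eq (line : List String) :
    removeTrailingPlaceholders_py line
    = (line.reverse.dropWhile (fun c => c == "-")).reverse := by
  rw [removeTrailingPlaceholders_py, pvFoldEqDropWhile]

theorem pvA_snoc (line : List String) (a : String) :
    removeTrailingPlaceholders_py (line ++ [a])
    = if a = "-" then removeTrailingPlaceholders_py line else line ++ [a] := by
  rw [pvA_eq, pvA_eq]
  by_cases h : a = "-"
  · simp [h]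
  · have hb : (a == "-") = false := by simp [h]
    simp [h, hb]

theorem pvTrimLen_le (line : List String) (n : Nat) : pvTrimLen line n ≤ n := by
  induction n with
  | zero => exact Nat.le_refl 0
  | succ n ih =>
    rw [pvTrimLen]
    split
    · exact ih.trans (Nat.le_succ n)
    · exact Nat.le_refl _

-- the boundary scan never looks at indices ≥ n, so a snoc beyond n does not change it
theorem pvTrimLen_append (line : List String) (a : String) (n : Nat) (h : n ≤ line.length) :
    pvTrimLen (line ++ [a]) n = pvTrimLen line n := by
  induction n with
  | zero => rfl
  | succ n ih =>
    have hn : n < line.length := h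
    rw [pvTrimLen, pvTrimLen, List.getElem?_append_left hn, ih (Nat.le_of_lt hn)]

theorem pvB_snoc (line : List String) (a : String) :
    removeTrailingPlaceholders_py_alt (line ++ [a])
    = if a = "-" then removeTrailingPlaceholders_py_alt line else line ++ [a] := by
  have hget : getElem? (line ++ [a]) line.length = some a := by simp
  by_cases h : a = "-"
  · subst h
    have hstep : pvTrimLen (line ++ ["-"]) (line.length + 1) = pvTrimLen line line.length := by
      rw [pvTrimLen, hget]
      simp [pvTrimLen_append line "-" line.length (Nat.le_refl _)]
    have hle : pvTrimLen line line.length ≤ line.length := pvTrimLen_le _ _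
    simp only [removeTrailingPlaceholders_py_alt, List.length_append, List.length_cons,
      List.length_nil, hstep]
    simp [List.take_append_of_le_length hle]
  · have hstep : pvTrimLen (line ++ [a]) (line.length + 1) = line.length + 1 := by
      rw [pvTrimLen, hget]
      simp [h]
    simp only [removeTrailingPlaceholders_py_alt, List.length_append, List.length_cons,
      List.length_nil, hstep, if_neg h]
    simp

theorem pvAB_eq (line : List String) :
    removeTrailingPlaceholders_py line = removeTrailingPlaceholders_py_alt line := by
  induction line using List.reverseRecOn with
  | nil => rfl
  | append_singleton l a ih => rw [pvA_snoc, pvB_snoc, ih]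

-- ===== VERDICT (by name: the statement is the Claim_ definition above) =====
theorem removeTrailingPlaceholders_py_spec : Claim_equal_removeTrailingPlaceholders_py := by
  intro line _
  exact pvAB_eq line
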